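-- pv_equiv track=rewrite | github.com/be-wise-be-kind/thai-lint | tests/integration/rust_trials/generate_report.py | build_repo_summary
-- ===== SOURCE A (Python) =====
-- from typing import Any
--
-- def build_repo_summary(results: list[dict[str, Any]]) -> dict[str, list[dict[str, Any]]]:
--     """Group results by repository for per-repo breakdown.
--
--     Args:
--         results: All trial results
--
--     Returns:
--         Dict mapping repo name to list of rule results for that repo
--     """
--     repo_map: dict[str, list[dict[str, Any]]] = {}
--     for result in results:
--         repo_name = result["repo"]
--         if repo_name not in repo_map:
--             repo_map[repo_name] = []
--         repo_map[repo_name].append(result)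
--     return repo_map
-- ===== SOURCE B (Python) =====
-- def build_repo_summary(results):
--     """Group results by repository for per-repo breakdown.
--
--     Two-phase: collect repo names in first-occurrence order, then build each
--     group with a filter pass over the whole list.
--     """
--     order = list(dict.fromkeys(result["repo"] for result in results))
--     return {name: [r for r in results if r["repo"] == name] for name in order}
-- ===== Notes on version B (the rewrite author's own statement) =====
-- stated objective: alternative
-- what changed: Replaced A's single-pass dict-mutation loop (membership check + append per element) with a two-phase keys-then-filter build: dedupe the repo names in first-occurrence order, then construct each group by filtering the whole list per name.
import Mathlib
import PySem

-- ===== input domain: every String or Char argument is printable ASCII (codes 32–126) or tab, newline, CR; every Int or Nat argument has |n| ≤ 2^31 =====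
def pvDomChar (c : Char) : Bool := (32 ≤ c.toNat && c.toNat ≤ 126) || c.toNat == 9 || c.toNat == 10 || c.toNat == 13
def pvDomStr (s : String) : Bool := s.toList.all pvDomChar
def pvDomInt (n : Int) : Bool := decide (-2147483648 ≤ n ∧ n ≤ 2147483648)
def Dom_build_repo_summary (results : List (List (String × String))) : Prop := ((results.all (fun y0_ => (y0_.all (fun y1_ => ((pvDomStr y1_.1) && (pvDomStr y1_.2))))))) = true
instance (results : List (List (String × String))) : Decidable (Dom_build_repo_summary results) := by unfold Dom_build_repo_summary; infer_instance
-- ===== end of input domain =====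

-- B replaces A's single-pass dict-mutation grouping by a two-phase keys-then-filter build (same cost class, different decomposition).


-- ===== PORT A =====
-- result["repo"]: first-match lookup in the dict; none (Python KeyError) is excluded by Pre_, so getD "" is never the value used
def pvRepoOf (r : List (String × String)) : String :=
  ((PySem.Dict.mk r).get? "repo").getD ""

def build_repo_summary (results : List (List (String × String))) : List (String × List (List (String × String))) :=
  (results.foldl (fun repo_map result =>
      let repo_name := pvRepoOf result
      let repo_map := if repo_map.contains repo_name then repo_map else repo_map.insert repo_name []
      repo_map.modify repo_name [] (fun g => g ++ [result]))
    PySem.Dict.empty).items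

-- ===== PORT B =====
def build_repo_summary_alt (results : List (List (String × String))) : List (String × List (List (String × String))) :=
  let order := PySem.List.dedup (results.map (fun r => pvRepoOf r))
  order.map (fun name => (name, results.filter (fun r => pvRepoOf r == name)))

-- ===== PRECONDITION & SPEC =====
-- Pre_ excludes exactly the inputs on which Python A raises KeyError: some result lacks the key "repo".
def Pre_build_repo_summary (results : List (List (String × String))) : Prop :=
  ∀ r ∈ results, "repo" ∈ r.map Prod.fst
instance (results : List (List (String × String))) : Decidable (Pre_build_repo_summary results) := by unfold Pre_build_repo_summary; infer_instance

def pvWitness_build_repo_summary : (List (List (String × String))) :=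
  [[("repo", "a"), ("rule", "r1")], [("repo", "b")], [("repo", "a")]]

def Spec_build_repo_summary (results : List (List (String × String))) (out : List (String × List (List (String × String)))) : Prop := out = build_repo_summary_alt results
instance (results : List (List (String × String))) (out : List (String × List (List (String × String)))) : Decidable (Spec_build_repo_summary results out) := by unfold Spec_build_repo_summary; infer_instance

-- ===== CLAIM (what is proved, stated in full; the proofs are below) =====
def Claim_equal_build_repo_summary : Prop := ∀ (results : List (List (String × String))), Dom_build_repo_summary results → Pre_build_repo_summary results → Spec_build_repo_summary results (build_repo_summary results)

-- ===== LEMMAS AND PROOFS =====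

theorem pv_get?_mk_append {ν : Type} (l : List (String × ν)) (n : String) (v : ν)
    (h : ∀ p ∈ l, ¬ p.1 = n) :
    (PySem.Dict.mk (l ++ [(n, v)])).get? n = some v := by
  induction l with
  | nil => simp [PySem.Dict.get?_mk_cons]
  | cons p t ih =>
    rw [List.cons_append, PySem.Dict.get?_mk_cons]
    simp only [beq_iff_eq, h p (by simp), if_false]
    exact ih (fun q hq => h q (by simp [hq]))

-- A's "if absent then insert []" followed by append-at-key is exactly Dict.modify with default []
theorem pv_step_eq (d : PySem.Dict String (List (List (String × String)))) (n : String)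
    (r : List (String × String)) :
    ((if d.contains n then d else d.insert n []).modify n [] (fun g => g ++ [r]))
      = d.modify n [] (fun g => g ++ [r]) := by
  by_cases h : d.contains n
  · simp [h]
  · have hk : ∀ p ∈ d.items, ¬ p.1 = n := by
      intro p hp hpe
      have : d.contains n = true := by
        rw [PySem.Dict.contains_iff_mem_keys]
        simp only [PySem.Dict.keys]
        exact List.mem_map.mpr ⟨p, hp, hpe⟩
      simp [this] at h
    have hg : d.get? n = none := by
      rw [PySem.Dict.get?_eq_none_iff_not_mem_keys]
      simp only [PySem.Dict.keys]
      intro hmem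
      obtain ⟨p, hp, hpe⟩ := List.mem_map.mp hmem
      exact hk p hp hpe
    simp only [Bool.not_eq_true] at h
    apply PySem.Dict.ext
    simp only [PySem.Dict.modify, PySem.Dict.insert, h, Bool.false_eq_true, reduceIte,
      PySem.Dict.contains_mk, List.any_append, List.any_cons, BEq.rfl, List.any_nil, Bool.or_false,
      Bool.or_true, beq_iff_eq, PySem.Dict.getD, List.map_append, List.map_cons, List.map_nil,
      List.append_singleton_inj, Prod.mk.injEq, List.append_cancel_right_eq, true_and]
    constructor
    · exact (List.map_congr_left (fun p hp => by simp [hk p hp])).trans (List.map_id _)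
    · rw [pv_get?_mk_append d.items n [] hk, hg]
      rfl

theorem pv_main (results : List (List (String × String))) :
    build_repo_summary results = build_repo_summary_alt results := by
  unfold build_repo_summary build_repo_summary_alt
  simp only [pv_step_eq]
  have hfold : (results.foldl (fun d r => d.modify (pvRepoOf r) [] (fun g => g ++ [r])) PySem.Dict.empty)
      = ((results.map (fun r => (pvRepoOf r, r))).foldl
          (fun d p => d.modify p.1 [] (fun g => g ++ [p.2])) PySem.Dict.empty) := by
    rw [List.foldl_map]
  set d := (results.foldl (fun d r => d.modify (pvRepoOf r) [] (fun g => g ++ [r])) PySem.Dict.empty) with hd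
  have hnd : d.keys.Nodup := by
    rw [hd]
    exact PySem.Dict.nodup_keys_foldl_modify_key results pvRepoOf []
      (fun d r => (fun g => g ++ [r])) PySem.Dict.empty (by simp)
  have hkeys : d.keys = PySem.List.dedup (results.map (fun r => pvRepoOf r)) := by
    rw [hd, PySem.Dict.keys_foldl_modify_key]
    simp [PySem.Set.update_nil_left]
  have hget : ∀ c, d.getD c [] = results.filter (fun r => pvRepoOf r == c) := by
    intro c
    rw [hfold, PySem.Dict.getD_foldl_modify_append]
    simp [List.filter_map, Function.comp_def]
  rw [PySem.Dict.items_eq_map_keys d hnd [], hkeys]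
  exact List.map_congr_left (fun name _ => by rw [hget name])

-- ===== VERDICT (by name: the statement is the Claim_ definition above) =====
theorem build_repo_summary_spec : Claim_equal_build_repo_summary := by
  intro results _ _
  exact pv_main results
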